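-- pv_equiv track=rewrite | github.com/christerng/PyGit | pygit/diff.py | iter_changed_files
-- ===== SOURCE A (Python) =====
-- from collections import defaultdict
-- from typing import Any, Generator, Tuple, Optional
--
-- def compare_trees(*trees: dict) -> Generator[Tuple[str, ...], None, None]:
--     entries = defaultdict(lambda: [None] * len(trees))
--
--     for i, tree in enumerate(trees):
--         for path, oid in tree.items():
--             entries[path][i] = oid
--
--     for path, oids in entries.items():
--         yield path, *oids
--
-- def iter_changed_files(
--     tree_from: dict,
--     tree_to: dict
-- ) -> Generator[Tuple[str, str], None, None]:
--     for path, oid_from, oid_to in compare_trees(tree_from, tree_to):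
--         if oid_from != oid_to:
--             action = (
--                 "new file" if not oid_from else
--                 "deleted" if not oid_to else
--                 "modified"
--             )
--             yield path, action
-- ===== SOURCE B (Python) =====
-- def iter_changed_files(tree_from, tree_to):
--     # Two direct passes over the inputs; no merged defaultdict is built.
--     for path, oid_from in tree_from.items():
--         oid_to = tree_to.get(path)
--         if oid_from != oid_to:
--             yield path, (
--                 "new file" if not oid_from else
--                 "deleted" if not oid_to else
--                 "modified"
--             )
--     for path, oid_to in tree_to.items():
--         if path not in tree_from:
--             yield path, "new file"
-- ===== Notes on version B (the rewrite author's own statement) =====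
-- stated objective: simpler
-- what changed: Drops the intermediate merged defaultdict entirely: two direct passes, one over tree_from (looking oids up in tree_to) and one over tree_to yielding 'new file' for paths absent from tree_from, preserving the exact order.
import Mathlib
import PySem

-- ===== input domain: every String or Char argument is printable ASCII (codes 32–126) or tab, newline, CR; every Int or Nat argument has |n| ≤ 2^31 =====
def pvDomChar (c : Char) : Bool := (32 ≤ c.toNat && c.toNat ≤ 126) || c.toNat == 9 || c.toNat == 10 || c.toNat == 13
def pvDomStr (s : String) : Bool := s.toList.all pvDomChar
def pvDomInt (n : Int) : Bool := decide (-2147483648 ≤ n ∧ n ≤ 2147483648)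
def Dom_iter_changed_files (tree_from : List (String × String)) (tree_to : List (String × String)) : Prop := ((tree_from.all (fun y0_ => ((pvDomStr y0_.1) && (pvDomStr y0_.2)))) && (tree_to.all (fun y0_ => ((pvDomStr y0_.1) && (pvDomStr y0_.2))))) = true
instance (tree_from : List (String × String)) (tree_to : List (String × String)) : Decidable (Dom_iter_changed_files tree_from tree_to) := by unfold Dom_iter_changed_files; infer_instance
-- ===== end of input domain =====

-- B drops A's intermediate merged defaultdict and instead makes two direct passes over the
-- input dicts, producing the same sequence of (path, action) pairs (objective: simpler).

-- ===== PORT A =====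
-- A's conditional expression choosing the action (Python's 'not oid' is true for None and for "")
def pvActionA (f t : Option String) : String :=
  if f = none ∨ f = some "" then "new file"
  else if t = none ∨ t = some "" then "deleted"
  else "modified"

def iter_changed_files (tree_from : List (String × String)) (tree_to : List (String × String)) : List (String × String) :=
  -- compare_trees: entries = defaultdict(lambda: [None, None]); for each tree: entries[path][i] = oid
  -- (inner fold = the i = 0 loop over tree_from, outer fold = the i = 1 loop over tree_to)
  (tree_to.foldl (fun d po => d.insert po.1 ((d.getD po.1 (none, none)).1, some po.2))
    (tree_from.foldl (fun d po => d.insert po.1 (some po.2, (d.getD po.1 (none, none)).2))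
      (PySem.Dict.empty : PySem.Dict String (Option String × Option String)))).items.foldl
    -- for path, oid_from, oid_to in compare_trees(...): if oid_from != oid_to: yield path, action
    (fun acc e => if e.2.1 ≠ e.2.2 then acc ++ [(e.1, pvActionA e.2.1 e.2.2)] else acc) []

-- ===== PORT B =====
def iter_changed_files_alt (tree_from : List (String × String)) (tree_to : List (String × String)) : List (String × String) :=
  -- first pass: every path of tree_from, oid_to looked up in tree_to
  (tree_from.foldl (fun acc po =>
    let t := (PySem.Dict.mk tree_to).get? po.1
    if some po.2 ≠ t then
      acc ++ [(po.1, if po.2 = "" then "new file"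
                     else if t = none ∨ t = some "" then "deleted"
                     else "modified")]
    else acc) [])
  -- second pass: paths only in tree_to are always new files
  ++ (tree_to.foldl (fun acc po =>
    if (PySem.Dict.mk tree_from).contains po.1 then acc else acc ++ [(po.1, "new file")]) [])

-- ===== PRECONDITION & SPEC =====
-- The Python arguments are dicts, whose keys are necessarily distinct; Pre_ states exactly that
-- dict invariant for the association lists (no actual input of the Python A is excluded).
def Pre_iter_changed_files (tree_from : List (String × String)) (tree_to : List (String × String)) : Prop :=
  (tree_from.map Prod.fst).Nodup ∧ (tree_to.map Prod.fst).Nodup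
instance (tree_from : List (String × String)) (tree_to : List (String × String)) : Decidable (Pre_iter_changed_files tree_from tree_to) := by unfold Pre_iter_changed_files; infer_instance

def pvWitness_iter_changed_files : (List (String × String)) × (List (String × String)) :=
  ([("a", "1"), ("b", "2"), ("c", "")], [("b", "3"), ("d", "4")])

def Spec_iter_changed_files (tree_from : List (String × String)) (tree_to : List (String × String)) (out : List (String × String)) : Prop := out = iter_changed_files_alt tree_from tree_to
instance (tree_from : List (String × String)) (tree_to : List (String × String)) (out : List (String × String)) : Decidable (Spec_iter_changed_files tree_from tree_to out) := by unfold Spec_iter_changed_files; infer_instance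

-- ===== CLAIM (what is proved, stated in full; the proofs are below) =====
def Claim_equal_iter_changed_files : Prop := ∀ (tree_from : List (String × String)) (tree_to : List (String × String)), Dom_iter_changed_files tree_from tree_to → Pre_iter_changed_files tree_from tree_to → Spec_iter_changed_files tree_from tree_to (iter_changed_files tree_from tree_to)

-- ===== LEMMAS AND PROOFS =====
abbrev pvDictT := PySem.Dict String (Option String × Option String)

def step1 (d : pvDictT) (po : String × String) : pvDictT := d.insert po.1 (some po.2, (d.getD po.1 (none, none)).2)
def step2 (d : pvDictT) (po : String × String) : pvDictT := d.insert po.1 ((d.getD po.1 (none, none)).1, some po.2)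

lemma fold1_items (tf : List (String × String)) (d : pvDictT)
    (hn : (tf.map Prod.fst).Nodup) (hd : d.keys.Nodup)
    (hf : ∀ p ∈ tf.map Prod.fst, d.contains p = false) :
    (tf.foldl step1 d).items = d.items ++ tf.map (fun po => (po.1, (some po.2, (none : Option String)))) := by
  induction tf generalizing d with
  | nil => simp
  | cons po tl ih =>
    have hc : d.contains po.1 = false := hf po.1 (by simp)
    have hstep : step1 d po = d.insert po.1 (some po.2, none) := by
      unfold step1
      rw [PySem.Dict.getD_of_not_contains d (none, none) hc]
    simp only [List.map_cons, List.nodup_cons] at hn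
    rw [List.foldl_cons, hstep,
      ih _ hn.2 (PySem.Dict.nodup_keys_insert d po.1 _ hd)
        (by
          intro p hp
          rw [PySem.Dict.contains_insert]
          have : p ≠ po.1 := fun h => hn.1 (h ▸ hp)
          simp [this, hf p (by simp [hp])]),
      PySem.Dict.items_insert_of_not_contains d _ hc]
    simp

lemma fold2_items (tt : List (String × String)) (d : pvDictT)
    (hn : (tt.map Prod.fst).Nodup) (hd : d.keys.Nodup) :
    (tt.foldl step2 d).items
      = d.items.map (fun e => (e.1, (e.2.1, ((PySem.Dict.mk tt).get? e.1).or e.2.2)))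
        ++ (tt.filter (fun q => !d.contains q.1)).map (fun q => (q.1, ((none : Option String), some q.2))) := by
  induction tt generalizing d with
  | nil =>
    have : ∀ e ∈ d.items, (e.1, (e.2.1, ((PySem.Dict.mk ([] : List (String × String))).get? e.1).or e.2.2)) = e := by
      intro e _; simp [PySem.Dict.get?]
    simp [List.map_congr_left this]
  | cons po tl ih =>
    obtain ⟨p, o⟩ := po
    simp only [List.map_cons, List.nodup_cons] at hn
    have hme : p ∉ tl.map Prod.fst := hn.1
    have htl : (PySem.Dict.mk tl).get? p = none := by
      rw [PySem.Dict.get?_eq_none_iff_not_mem_keys]; simpa [PySem.Dict.keys_mk] using hme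
    have hfilt : ∀ (v : Option String × Option String),
        tl.filter (fun q => !(d.insert p v).contains q.1) = tl.filter (fun q => !d.contains q.1) := by
      intro v
      apply List.filter_congr
      intro q hq
      have : q.1 ≠ p := fun h => hme (h ▸ (List.mem_map_of_mem hq))
      rw [PySem.Dict.contains_insert]
      simp [this]
    rw [List.foldl_cons]
    by_cases hc : d.contains p = true
    · have hstep : step2 d (p, o) = d.insert p ((d.getD p (none, none)).1, some o) := rfl
      rw [hstep, ih _ hn.2 (PySem.Dict.nodup_keys_insert d p _ hd)]
      rw [PySem.Dict.items_insert_of_contains d _ hc, List.map_map, hfilt]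
      rw [List.filter_cons_of_neg (by simp [hc])]
      congr 1
      apply List.map_congr_left
      intro e he
      by_cases h1 : e.1 = p
      · have hg : d.getD e.1 (none, none) = e.2 :=
          PySem.Dict.getD_of_mem_items d (by simpa using he) hd (none, none)
        simp only [Function.comp_apply, ← h1, PySem.Dict.get?_mk_cons]
        simp [h1, htl]
        rw [← h1, hg]
      · simp only [Function.comp_apply, PySem.Dict.get?_mk_cons,
          show (e.1 == p) = false by simp [h1], show (p == e.1) = false by simp [Ne.symm h1]]
        simp
    · have hcf : d.contains p = false := by simpa using hc
      have hstep : step2 d (p, o) = d.insert p (none, some o) := by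
        unfold step2
        rw [PySem.Dict.getD_of_not_contains d (none, none) hcf]
      rw [hstep, ih _ hn.2 (PySem.Dict.nodup_keys_insert d p _ hd),
        PySem.Dict.items_insert_of_not_contains d _ hcf]
      rw [List.filter_cons_of_pos (by simp [hcf]), List.map_append, hfilt]
      have hmapeq : ∀ e ∈ d.items,
          (e.1, (e.2.1, ((PySem.Dict.mk tl).get? e.1).or e.2.2))
            = (e.1, (e.2.1, ((PySem.Dict.mk ((p, o) :: tl)).get? e.1).or e.2.2)) := by
        intro e he
        have h1 : e.1 ≠ p := by
          intro h
          have hm : e.1 ∈ d.keys := PySem.Dict.mem_keys_of_mem_items d he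
          rw [← PySem.Dict.contains_iff_mem_keys, h, hcf] at hm
          cases hm
        rw [PySem.Dict.get?_mk_cons]
        simp [show (p == e.1) = false by simp [Ne.symm h1]]
      rw [List.map_congr_left hmapeq]
      simp [PySem.Dict.get?_mk_cons, htl]

theorem pvMain (tf tt : List (String × String))
    (h1 : (tf.map Prod.fst).Nodup) (h2 : (tt.map Prod.fst).Nodup) : iter_changed_files tf tt = iter_changed_files_alt tf tt := by
  unfold iter_changed_files iter_changed_files_alt
  -- normalise all four loops into filter/map form
  have e1_items : (tf.foldl (fun d po => d.insert po.1 (some po.2, (d.getD po.1 (none, none)).2)) (PySem.Dict.empty : pvDictT)).items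
      = tf.map (fun po => (po.1, (some po.2, (none : Option String)))) := by
    have := fold1_items tf PySem.Dict.empty h1 (by simp [PySem.Dict.keys_empty])
      (by intro p _; exact PySem.Dict.contains_empty p)
    simpa [step1] using this
  set e1 : pvDictT := tf.foldl (fun d po => d.insert po.1 (some po.2, (d.getD po.1 (none, none)).2)) PySem.Dict.empty with he1
  have e1_keys : e1.keys = tf.map Prod.fst := by
    show e1.items.map (·.1) = _
    rw [e1_items, List.map_map]; simp
  have e1_nodup : e1.keys.Nodup := by rw [e1_keys]; exact h1
  have e2_items := fold2_items tt e1 h2 e1_nodup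
  rw [show (tt.foldl (fun d po => d.insert po.1 ((d.getD po.1 (none, none)).1, some po.2)) e1)
      = tt.foldl step2 e1 from rfl, e2_items, e1_items]
  -- guards into Bool form, then foldl_append_if
  rw [show (fun (acc : List (String × String)) (e : String × Option String × Option String) =>
        if e.2.1 ≠ e.2.2 then acc ++ [(e.1, pvActionA e.2.1 e.2.2)] else acc)
      = (fun acc e => if (fun (e : String × Option String × Option String) => decide (e.2.1 ≠ e.2.2)) e = true
          then acc ++ [(fun (e : String × Option String × Option String) => (e.1, pvActionA e.2.1 e.2.2)) e] else acc) from by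
    funext acc e; simp]
  rw [PySem.List.foldl_append_if]
  rw [show (fun (acc : List (String × String)) (po : String × String) =>
        let t := (PySem.Dict.mk tt).get? po.1
        if some po.2 ≠ t then
          acc ++ [(po.1, if po.2 = "" then "new file"
                         else if t = none ∨ t = some "" then "deleted"
                         else "modified")]
        else acc)
      = (fun acc po => if (fun (po : String × String) => decide (some po.2 ≠ (PySem.Dict.mk tt).get? po.1)) po = true
          then acc ++ [(fun (po : String × String) =>
            (po.1, if po.2 = "" then "new file"
                   else if (PySem.Dict.mk tt).get? po.1 = none ∨ (PySem.Dict.mk tt).get? po.1 = some "" then "deleted"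
                   else "modified")) po] else acc) from by
    funext acc po; simp]
  rw [PySem.List.foldl_append_if]
  rw [show (fun (acc : List (String × String)) (po : String × String) =>
        if (PySem.Dict.mk tf).contains po.1 then acc else acc ++ [(po.1, "new file")])
      = (fun acc po => if (fun (po : String × String) => !(PySem.Dict.mk tf).contains po.1) po = true
          then acc ++ [(fun (po : String × String) => (po.1, "new file")) po] else acc) from by
    funext acc po; cases h : (PySem.Dict.mk tf).contains po.1 <;> simp [h]]
  rw [PySem.List.foldl_append_if]
  simp only [List.nil_append, List.filter_append, List.map_append]
  congr 1
  · -- tree_from part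
    rw [List.filter_map, List.map_map, List.filter_map, List.map_map]
    rw [List.filter_congr (fun po _ => by
      simp only [Function.comp_apply]
      show (decide ¬((some po.2 : Option String) = ((PySem.Dict.mk tt).get? po.1).or none))
          = decide ¬((some po.2 : Option String) = (PySem.Dict.mk tt).get? po.1)
      simp [Option.or_none])]
    apply List.map_congr_left
    intro po _
    simp only [Function.comp_apply]
    unfold pvActionA
    simp only [Option.or_none]
    by_cases h : po.2 = "" <;> simp [h]
  · -- tree_to-only part
    have hc : ∀ q : String × String, e1.contains q.1 = (PySem.Dict.mk tf).contains q.1 := by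
      intro q
      rw [PySem.Dict.contains_eq_decide_mem_keys, PySem.Dict.contains_eq_decide_mem_keys,
        e1_keys, PySem.Dict.keys_mk]
    rw [List.filter_congr (fun q _ => by rw [hc] :
      ∀ q ∈ tt, (!e1.contains q.1) = (!(PySem.Dict.mk tf).contains q.1))]
    rw [List.filter_map, List.map_map]
    rw [List.filter_congr (fun q _ => by
      simp only [Function.comp_apply]
      show (decide ¬((none : Option String) = some q.2)) = true
      simp : ∀ q ∈ tt.filter (fun q => !(PySem.Dict.mk tf).contains q.1),
        ((fun e : String × Option String × Option String => decide ¬(e.2.1 = e.2.2)) ∘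
          (fun q : String × String => (q.1, ((none : Option String), some q.2)))) q = (fun _ => true) q)]
    rw [List.filter_true]
    apply List.map_congr_left
    intro q _
    rfl

-- ===== VERDICT (by name: the statement is the Claim_ definition above) =====
theorem iter_changed_files_spec : Claim_equal_iter_changed_files := by
  intro tf tt _ hpre
  show iter_changed_files tf tt = iter_changed_files_alt tf tt
  exact pvMain tf tt hpre.1 hpre.2
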